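-- pv_equiv track=rewrite | github.com/MohiuddinSohel/Leetcoding | amazonOAPreparation/OA.py | box_removed_less_capacity
-- ===== SOURCE A (Python) =====
-- def box_removed_less_capacity(arr, cap):
--     # https://leetcode.com/company/amazon/discuss/5875380/Amazon-OA-question-SDE1
--     arr.sort()
--     l, min_len = 0, len(arr)
--     for r in range(len(arr)):
--         while l < r and arr[r] > cap * arr[l]:
--             l += 1
--         min_len = min(min_len, len(arr) - (r - l + 1))
--     return min_len
-- ===== SOURCE B (Python) =====
-- import bisect
--
--
-- def box_removed_less_capacity(arr, cap):
--     # Per-left-endpoint binary search instead of A's sequential two-pointer.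
--     # Like A, sorts arr in place (same observable mutation).
--     arr.sort()
--     best = 0
--     for l in range(len(arr)):
--         r = bisect.bisect_right(arr, cap * arr[l]) - 1
--         if r >= l:
--             best = max(best, r - l + 1)
--     return len(arr) - max(best, 1) if arr else 0
-- ===== Notes on version B (the rewrite author's own statement) =====
-- stated objective: alternative
-- what changed: Replaces A's stateful forward two-pointer (shared left pointer advanced across right endpoints) with an independent binary search (bisect_right) for the rightmost valid index per left endpoint, maximizing the window and subtracting from the length.
import Mathlib
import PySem

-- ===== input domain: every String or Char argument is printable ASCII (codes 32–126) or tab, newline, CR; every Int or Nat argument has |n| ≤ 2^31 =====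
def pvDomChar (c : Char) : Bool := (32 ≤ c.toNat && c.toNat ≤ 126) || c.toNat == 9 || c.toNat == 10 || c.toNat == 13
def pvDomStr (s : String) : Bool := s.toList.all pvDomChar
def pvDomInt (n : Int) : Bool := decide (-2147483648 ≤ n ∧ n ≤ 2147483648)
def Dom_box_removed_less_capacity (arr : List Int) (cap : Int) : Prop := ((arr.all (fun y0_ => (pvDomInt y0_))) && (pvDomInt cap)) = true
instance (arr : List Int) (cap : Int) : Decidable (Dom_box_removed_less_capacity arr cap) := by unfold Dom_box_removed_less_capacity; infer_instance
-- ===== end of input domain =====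

-- B replaces A's sequential two-pointer with an independent bisect_right per left endpoint
-- (objective: alternative).  Both Pythons sort arr in place; the equivalence proved here is
-- about the RETURN value (B performs the same mutation).

-- ===== PORT A =====
-- the inner `while l < r and arr[r] > cap * arr[l]: l += 1`
def pvAdv (s : List Int) (cap : Int) (r l : Nat) : Nat :=
  if _h : l < r then
    if s.getD r 0 > cap * s.getD l 0 then pvAdv s cap r (l + 1) else l
  else l
termination_by r - l

-- one iteration of the `for r in range(len(arr))` loop; state = (l, min_len)
def pvAStep (s : List Int) (cap : Int) (st : Nat × Int) (r : Nat) : Nat × Int :=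
  let l := pvAdv s cap r st.1
  (l, min st.2 ((s.length : Int) - ((r : Int) - (l : Int) + 1)))

def box_removed_less_capacity (arr : List Int) (cap : Int) : Int :=
  let s := PySem.List.sorted arr (fun x => x)
  ((List.range s.length).foldl (pvAStep s cap) (0, (s.length : Int))).2

-- ===== PORT B =====
-- one iteration of B's `for l in range(len(arr))` loop; state = best
def pvBStep (s : List Int) (cap : Int) (b : Int) (l : Nat) : Int :=
  let r : Int := (PySem.List.bisectRight s (cap * s.getD l 0) : Int) - 1
  if (l : Int) ≤ r then max b (r - (l : Int) + 1) else b

def box_removed_less_capacity_alt (arr : List Int) (cap : Int) : Int :=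
  let s := PySem.List.sorted arr (fun x => x)
  if s.isEmpty then 0
  else (s.length : Int) - max ((List.range s.length).foldl (pvBStep s cap) 0) 1

-- ===== PRECONDITION & SPEC =====
def Spec_box_removed_less_capacity (arr : List Int) (cap : Int) (out : Int) : Prop := out = box_removed_less_capacity_alt arr cap
instance (arr : List Int) (cap : Int) (out : Int) : Decidable (Spec_box_removed_less_capacity arr cap out) := by unfold Spec_box_removed_less_capacity; infer_instance

-- ===== CLAIM (what is proved, stated in full; the proofs are below) =====
def Claim_equal_box_removed_less_capacity : Prop := ∀ (arr : List Int) (cap : Int), Dom_box_removed_less_capacity arr cap → Spec_box_removed_less_capacity arr cap (box_removed_less_capacity arr cap)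

-- ===== LEMMAS AND PROOFS =====

-- pointer value after processing r = 0 .. k-1 of A's outer loop
def pvPtr (s : List Int) (cap : Int) : Nat → Nat
  | 0 => 0
  | k + 1 => pvAdv s cap k (pvPtr s cap k)

-- min_len value after processing r = 0 .. k-1 of A's outer loop
def pvMins (s : List Int) (cap : Int) : Nat → Int
  | 0 => (s.length : Int)
  | k + 1 => min (pvMins s cap k)
      ((s.length : Int) - ((k : Int) - (pvPtr s cap (k + 1) : Int) + 1))

theorem pvAdv_le_r (s : List Int) (cap : Int) (r l : Nat) (h : l ≤ r) :
    pvAdv s cap r l ≤ r := by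
  fun_induction pvAdv <;> omega

-- the pointer never passes an index l₁ whose window still admits arr[r]
theorem pvAdv_le_of (s : List Int) (cap : Int) (r l l₁ : Nat) (h0 : l ≤ l₁)
    (h1 : ¬ s.getD r 0 > cap * s.getD l₁ 0) : pvAdv s cap r l ≤ l₁ := by
  induction h : r - l generalizing l with
  | zero =>
      unfold pvAdv
      split
      · split
        · omega
        · omega
      · omega
  | succ m ih =>
      unfold pvAdv
      split
      · split
        · rename_i hlr hcond
          rcases Nat.lt_or_ge l l₁ with hc | hc
          · exact ih (l + 1) (by omega) (by omega)
          · have : l = l₁ := by omega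
            subst this
            exact absurd hcond h1
        · omega
      · omega

-- if the while loop exits strictly left of r, the exit condition holds
theorem pvAdv_exit (s : List Int) (cap : Int) (r l : Nat)
    (h : pvAdv s cap r l < r) :
    ¬ s.getD r 0 > cap * s.getD (pvAdv s cap r l) 0 := by
  induction hm : r - l generalizing l with
  | zero =>
      have hlr : ¬ l < r := by omega
      unfold pvAdv at h
      rw [dif_neg hlr] at h
      exact absurd h hlr
  | succ m ih =>
      by_cases hlr : l < r
      · by_cases hcond : s.getD r 0 > cap * s.getD l 0
        · unfold pvAdv at h ⊢
          rw [dif_pos hlr, if_pos hcond] at h ⊢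
          exact ih (l + 1) h (by omega)
        · unfold pvAdv at h ⊢
          rw [dif_pos hlr, if_neg hcond] at h ⊢
          exact hcond
      · unfold pvAdv at h
        rw [dif_neg hlr] at h
        exact absurd h hlr

theorem pvPtr_le (s : List Int) (cap : Int) (k : Nat) : pvPtr s cap k ≤ k := by
  induction k with
  | zero => simp [pvPtr]
  | succ k ih =>
      have := pvAdv_le_r s cap k (pvPtr s cap k) ih
      simpa [pvPtr] using Nat.le_succ_of_le this

theorem pvFoldA (s : List Int) (cap : Int) (k : Nat) :
    (List.range k).foldl (pvAStep s cap) (0, (s.length : Int)) = (pvPtr s cap k, pvMins s cap k) := by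
  induction k with
  | zero => simp [pvPtr, pvMins]
  | succ k ih =>
      rw [List.range_succ, List.foldl_append, ih]
      simp [pvAStep, pvPtr, pvMins]

theorem pvMins_mono (s : List Int) (cap : Int) (j k : Nat) (h : j ≤ k) :
    pvMins s cap k ≤ pvMins s cap j := by
  induction k with
  | zero =>
      have : j = 0 := by omega
      simp [this]
  | succ k ih =>
      rcases Nat.lt_or_ge j (k+1) with h' | h'
      · exact le_trans (by simp [pvMins]) (ih (by omega))
      · have : j = k + 1 := by omega
        simp [this]

theorem pvMins_le_term (s : List Int) (cap : Int) (j k : Nat) (h : j < k) :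
    pvMins s cap k ≤ (s.length : Int) - ((j : Int) - (pvPtr s cap (j + 1) : Int) + 1) := by
  have := pvMins_mono s cap (j + 1) k h
  have h2 : pvMins s cap (j + 1) ≤ (s.length : Int) - ((j : Int) - (pvPtr s cap (j + 1) : Int) + 1) := by
    simp [pvMins]
  omega

-- characterizations of bisectRight on the sorted list (C = cap * s[l])
theorem pvBr_le (s : List Int) (C : Int) (hs : s.Pairwise (· ≤ ·)) :
    PySem.List.bisectRight s C ≤ s.length := (PySem.List.bisectRight_spec s C hs).1

theorem pvBr_mem1 (s : List Int) (C : Int) (hs : s.Pairwise (· ≤ ·)) (j : Nat)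
    (hj : j < s.length) (h : j < PySem.List.bisectRight s C) : s.getD j 0 ≤ C := by
  have := (PySem.List.bisectRight_spec s C hs).2.1 j hj h
  rwa [List.getD_eq_getElem s 0 hj]

theorem pvBr_mem2 (s : List Int) (C : Int) (hs : s.Pairwise (· ≤ ·)) (j : Nat)
    (hj : j < s.length) (h : PySem.List.bisectRight s C ≤ j) : C < s.getD j 0 := by
  have := (PySem.List.bisectRight_spec s C hs).2.2 j hj h
  rwa [List.getD_eq_getElem s 0 hj]

def pvW (s : List Int) (cap : Int) (l : Nat) : Nat :=
  PySem.List.bisectRight s (cap * s.getD l 0)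

theorem pvBest_ge (s : List Int) (cap : Int) (k l : Nat) (hl : l < k)
    (hv : l < pvW s cap l) :
    (pvW s cap l : Int) - (l : Int) ≤ (List.range k).foldl (pvBStep s cap) 0 := by
  induction k with
  | zero => omega
  | succ k ih =>
      rw [List.range_succ, List.foldl_append]
      simp only [List.foldl_cons, List.foldl_nil, pvBStep]
      rcases Nat.lt_or_ge l k with h | h
      · have := ih h
        split
        · exact le_trans this (le_max_left _ _)
        · exact this
      · have hlk : l = k := by omega
        subst hlk
        have hcond : (l : Int) ≤ (PySem.List.bisectRight s (cap * s.getD l 0) : Int) - 1 := by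
          unfold pvW at hv; omega
        rw [if_pos hcond]
        unfold pvW
        have : (pvW s cap l : Int) - (l : Int) ≤ ((pvW s cap l : Int) - 1) - (l : Int) + 1 := by omega
        exact le_trans this (le_max_right _ _)

theorem pvBest_cases (s : List Int) (cap : Int) (k : Nat) :
    (List.range k).foldl (pvBStep s cap) 0 = 0 ∨
    ∃ l, l < k ∧ l < pvW s cap l ∧
      (List.range k).foldl (pvBStep s cap) 0 = (pvW s cap l : Int) - (l : Int) := by
  induction k with
  | zero => left; simp
  | succ k ih =>
      rw [List.range_succ, List.foldl_append]
      simp only [List.foldl_cons, List.foldl_nil, pvBStep]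
      by_cases hc : (k : Int) ≤ (PySem.List.bisectRight s (cap * s.getD k 0) : Int) - 1
      · rw [if_pos hc]
        by_cases h : (PySem.List.bisectRight s (cap * s.getD k 0) : Int) - 1 - (k : Int) + 1 ≤
            (List.range k).foldl (pvBStep s cap) 0
        · rw [max_eq_left h]
          rcases ih with h0 | ⟨l, hl1, hl2, hl3⟩
          · left; exact h0
          · right; exact ⟨l, by omega, hl2, hl3⟩
        · rw [max_eq_right (by omega)]

          right
          exact ⟨k, by omega, by unfold pvW; omega, by unfold pvW; omega⟩
      · rw [if_neg hc]
        rcases ih with h0 | ⟨l, hl1, hl2, hl3⟩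
        · left; exact h0
        · right; exact ⟨l, by omega, hl2, hl3⟩

-- the pointer stays ≤ l while r has not passed bisectRight(C l)
theorem pvPtr_le_l (s : List Int) (cap : Int) (hs : s.Pairwise (· ≤ ·)) (l : Nat)
    (_hln : l < s.length) (j : Nat) (hj : j ≤ pvW s cap l) : pvPtr s cap j ≤ l := by
  induction j with
  | zero => simp [pvPtr]
  | succ j ih =>
      have hjl : j < pvW s cap l := by omega
      have hjn : j < s.length := lt_of_lt_of_le hjl (pvBr_le s _ hs)
      have hle : s.getD j 0 ≤ cap * s.getD l 0 := pvBr_mem1 s _ hs j hjn hjl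
      exact pvAdv_le_of s cap j (pvPtr s cap j) l (ih (by omega)) (by omega)

-- direction ≤ : every recorded A-window fits inside some B-window
theorem pvMins_ge (s : List Int) (cap : Int) (hs : s.Pairwise (· ≤ ·)) (k : Nat)
    (hk : k ≤ s.length) :
    (s.length : Int) - max ((List.range s.length).foldl (pvBStep s cap) 0) 1 ≤ pvMins s cap k := by
  induction k with
  | zero =>
      have h1 : (1 : Int) ≤ max ((List.range s.length).foldl (pvBStep s cap) 0) 1 := le_max_right _ _
      simp only [pvMins]
      omega
  | succ k ih =>
      have ih' := ih (by omega)
      have hterm : ((k : Int) - (pvPtr s cap (k + 1) : Int) + 1) ≤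
          max ((List.range s.length).foldl (pvBStep s cap) 0) 1 := by
        have hpk : pvPtr s cap (k + 1) ≤ k := by
          show pvAdv s cap k (pvPtr s cap k) ≤ k
          exact pvAdv_le_r s cap k (pvPtr s cap k) (pvPtr_le s cap k)
        rcases Nat.lt_or_ge (pvPtr s cap (k + 1)) k with hlt | hge
        · -- pointer strictly left of k: exit condition gives a valid B-window at l = pointer
          have hexit : ¬ s.getD k 0 > cap * s.getD (pvPtr s cap (k + 1)) 0 := by
            show ¬ s.getD k 0 > cap * s.getD (pvAdv s cap k (pvPtr s cap k)) 0
            exact pvAdv_exit s cap k (pvPtr s cap k) hlt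
          have hkn : k < s.length := by omega
          have hkbr : k < pvW s cap (pvPtr s cap (k + 1)) := by
            by_contra hcon
            rw [Nat.not_lt] at hcon
            unfold pvW at hcon
            have := pvBr_mem2 s (cap * s.getD (pvPtr s cap (k + 1)) 0) hs k hkn hcon
            omega
          have hb := pvBest_ge s cap s.length (pvPtr s cap (k + 1)) (by omega) (by omega)
          have hki : (k : Int) < (pvW s cap (pvPtr s cap (k + 1)) : Int) := by exact_mod_cast hkbr
          have hmx : (List.range s.length).foldl (pvBStep s cap) 0 ≤
              max ((List.range s.length).foldl (pvBStep s cap) 0) 1 := le_max_left _ _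
          omega
        · have hpe : pvPtr s cap (k + 1) = k := by omega
          rw [hpe]
          have h1 : (1 : Int) ≤ max ((List.range s.length).foldl (pvBStep s cap) 0) 1 := le_max_right _ _
          omega
      simp only [pvMins]
      omega

-- direction ≥ : A reaches the best B-window (or the trivial window of size 1)
theorem pvMins_le (s : List Int) (cap : Int) (hs : s.Pairwise (· ≤ ·)) (hn : 0 < s.length) :
    pvMins s cap s.length ≤
      (s.length : Int) - max ((List.range s.length).foldl (pvBStep s cap) 0) 1 := by
  rcases pvBest_cases s cap s.length with h0 | ⟨l, hl1, hl2, hl3⟩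
  · -- best = 0: max = 1; use the r = 0 term (window of size 1)
    rw [h0]
    have h1 : pvPtr s cap 1 = 0 := by simp [pvPtr, pvAdv]
    have := pvMins_le_term s cap 0 s.length hn
    rw [h1] at this
    simpa using this
  · set best := (List.range s.length).foldl (pvBStep s cap) 0 with hb
    have hbest1 : (1 : Int) ≤ best := by
      rw [hl3]; have : (l : Int) < (pvW s cap l : Int) := by exact_mod_cast hl2
      omega
    rw [max_eq_left hbest1]
    -- the window for l ends at R = pvW l - 1; the pointer at step R is ≤ l
    have hWle : pvW s cap l ≤ s.length := pvBr_le s _ hs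
    have hR : pvW s cap l - 1 < s.length := by omega
    have hptr : pvPtr s cap (pvW s cap l - 1 + 1) ≤ l := by
      have : pvW s cap l - 1 + 1 = pvW s cap l := by omega
      rw [this]
      exact pvPtr_le_l s cap hs l hl1 (pvW s cap l) le_rfl
    have hterm := pvMins_le_term s cap (pvW s cap l - 1) s.length hR
    have hcast : ((pvW s cap l - 1 : Nat) : Int) = (pvW s cap l : Int) - 1 := by omega
    rw [hl3]
    have hpc : (pvPtr s cap (pvW s cap l - 1 + 1) : Int) ≤ (l : Int) := by exact_mod_cast hptr
    omega

theorem pvMain (s : List Int) (cap : Int) (hs : s.Pairwise (· ≤ ·)) :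
    ((List.range s.length).foldl (pvAStep s cap) (0, (s.length : Int))).2 =
      (if s.isEmpty then 0
       else (s.length : Int) - max ((List.range s.length).foldl (pvBStep s cap) 0) 1) := by
  rw [pvFoldA]
  rcases Nat.eq_zero_or_pos s.length with h0 | hpos
  · have : s = [] := List.eq_nil_of_length_eq_zero h0
    subst this
    simp [pvMins]
  · have hne : ¬ s.isEmpty := by
      cases s with
      | nil => simp at hpos
      | cons a t => simp
    rw [if_neg (by simpa using hne)]
    exact le_antisymm (pvMins_le s cap hs hpos) (pvMins_ge s cap hs s.length le_rfl)

-- ===== VERDICT (by name: the statement is the Claim_ definition above) =====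
theorem box_removed_less_capacity_spec : Claim_equal_box_removed_less_capacity := by
  intro arr cap _
  unfold Spec_box_removed_less_capacity box_removed_less_capacity box_removed_less_capacity_alt
  exact pvMain (PySem.List.sorted arr (fun x => x)) cap
    (PySem.List.sorted_pairwise arr (fun x => x))
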